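-- pv_equiv track=rewrite | github.com/gaurang1703/dsa_interview | 4.py | solve
-- ===== SOURCE A (Python) =====
-- def solve(arr):
--     ans = []
--     for i in arr:
--         if i == 0:
--             ans = [0] + ans
--         else:
--             ans.append(1)
--     return ans
-- ===== SOURCE B (Python) =====
-- def solve(arr):
--     zeros = arr.count(0)
--     return [0] * zeros + [1] * (len(arr) - zeros)
-- ===== Notes on version B (the rewrite author's own statement) =====
-- stated objective: simpler
-- what changed: Replaces the per-element loop that prepends 0 or appends 1 with a single count of zeros and direct construction of the result by list repetition.
import Mathlib
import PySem

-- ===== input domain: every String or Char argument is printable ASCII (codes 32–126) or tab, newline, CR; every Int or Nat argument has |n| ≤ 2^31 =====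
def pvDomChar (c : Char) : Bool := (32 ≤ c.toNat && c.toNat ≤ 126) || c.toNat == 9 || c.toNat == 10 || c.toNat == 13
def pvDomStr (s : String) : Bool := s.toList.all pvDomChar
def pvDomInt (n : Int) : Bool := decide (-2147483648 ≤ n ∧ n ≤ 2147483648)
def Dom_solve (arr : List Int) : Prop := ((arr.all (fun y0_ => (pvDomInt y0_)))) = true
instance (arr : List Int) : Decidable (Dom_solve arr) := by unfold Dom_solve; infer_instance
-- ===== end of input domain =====

-- B replaces A's per-element prepend/append loop by counting zeros once and
-- building [0]*zeros ++ [1]*(len-zeros) directly (simpler, two lines).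

-- ===== PORT A =====
def solve (arr : List Int) : List Int :=
  arr.foldl (fun ans i => if i == 0 then 0 :: ans else ans ++ [1]) []

-- ===== PORT B =====
def solve_alt (arr : List Int) : List Int :=
  let zeros : Int := (PySem.List.count arr 0 : Int)
  PySem.List.pyRepeat [0] zeros ++ PySem.List.pyRepeat [1] ((arr.length : Int) - zeros)

-- ===== PRECONDITION & SPEC =====
def Spec_solve (arr : List Int) (out : List Int) : Prop := out = solve_alt arr
instance (arr : List Int) (out : List Int) : Decidable (Spec_solve arr out) := by unfold Spec_solve; infer_instance

-- ===== CLAIM (what is proved, stated in full; the proofs are below) =====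
def Claim_equal_solve : Prop := ∀ (arr : List Int), Dom_solve arr → Spec_solve arr (solve arr)

-- ===== LEMMAS AND PROOFS =====
lemma solve_foldl_inv (arr : List Int) (a b : Nat) :
    arr.foldl (fun ans i => if i == 0 then 0 :: ans else ans ++ [1])
      (List.replicate a (0 : Int) ++ List.replicate b 1)
    = List.replicate (a + arr.count 0) (0 : Int)
        ++ List.replicate (b + arr.countP (fun i => !(i == 0))) 1 := by
  induction arr generalizing a b with
  | nil => simp
  | cons x xs ih =>
    by_cases hx : x = 0
    · subst hx
      have h : (0 : Int) :: (List.replicate a (0 : Int) ++ List.replicate b 1)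
          = List.replicate (a + 1) (0 : Int) ++ List.replicate b 1 := by
        rw [List.replicate_succ]; rfl
      have e1 : a + 1 + xs.count 0 = a + (0 :: xs).count 0 := by
        simp [List.count_cons] <;> omega
      have e2 : b + xs.countP (fun i => !(i == 0))
          = b + ((0 : Int) :: xs).countP (fun i => !(i == 0)) := by
        simp [List.countP_cons] <;> omega
      rw [List.foldl_cons, if_pos (by simp), h, ih (a + 1) b, e1, e2]
    · have h : (List.replicate a (0 : Int) ++ List.replicate b 1) ++ [1]
          = List.replicate a (0 : Int) ++ List.replicate (b + 1) 1 := by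
        rw [List.append_assoc, List.replicate_succ']
      have e1 : a + xs.count 0 = a + (x :: xs).count 0 := by
        simp [List.count_cons, hx] <;> omega
      have e2 : b + 1 + xs.countP (fun i => !(i == 0))
          = b + (x :: xs).countP (fun i => !(i == 0)) := by
        simp [List.countP_cons, hx] <;> omega
      rw [List.foldl_cons, if_neg (by simp [hx]), h, ih a (b + 1), e1, e2]

lemma length_count_split (arr : List Int) :
    arr.length = arr.count 0 + arr.countP (fun i => !(i == 0)) := by
  induction arr with
  | nil => rfl
  | cons x xs ih =>
    by_cases hx : x = 0 <;> simp [List.countP_cons, hx, ih] <;> omega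

-- ===== VERDICT (by name: the statement is the Claim_ definition above) =====
theorem solve_spec : Claim_equal_solve := by
  intro arr _
  show solve arr = solve_alt arr
  have hlen := length_count_split arr
  have hcp : arr.countP (fun i => !(i == 0)) = arr.length - arr.count 0 := by omega
  have h := solve_foldl_inv arr 0 0
  simp only [List.replicate_zero, List.nil_append, Nat.zero_add] at h
  have hz : ((arr.count 0 : Int)).toNat = arr.count 0 := by omega
  have ho : (((arr.length : Int) - (arr.count 0 : Int))).toNat = arr.length - arr.count 0 := by
    omega
  rw [solve, h, solve_alt]
  simp only [PySem.List.pyRepeat_singleton, PySem.List.count_eq, hz, ho, hcp]
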